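-- pv_equiv track=rewrite | github.com/RobbeW/Data_Statistiek_R | Deel 3 Algoritmiek/01 Lijsten en tuples/08 Victory Points/solution/solution.nl.py | winnaar
-- ===== SOURCE A (Python) =====
-- def winnaar(n, puntenlijst):
--     scores = [0] * n
--
--     for i in range(len(puntenlijst)):
--         scores[i % n] += puntenlijst[i]
--
--
--     max_i = 0
--     for i in range(1, n):
--         if scores[i] >= scores[max_i]:
--             max_i = i
--
--     return max_i + 1
-- ===== SOURCE B (Python) =====
-- def winnaar(n, puntenlijst):
--     # Gather per player with a strided index range (one pass per player),
--     # tracking the running best; ties broken by the later player, as in A.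
--     best = 1
--     best_score = None
--     for j in range(n):
--         s = sum(puntenlijst[i] for i in range(j, len(puntenlijst), n))
--         if best_score is None or s >= best_score:
--             best, best_score = j + 1, s
--     return best
-- ===== Notes on version B (the rewrite author's own statement) =====
-- stated objective: alternative
-- what changed: Replaces A's modulo scatter into a scores array followed by a separate argmax scan with a single per-player loop that gathers each player's points via a strided index range and tracks the running best (same last-wins tie rule).
import Mathlib
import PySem

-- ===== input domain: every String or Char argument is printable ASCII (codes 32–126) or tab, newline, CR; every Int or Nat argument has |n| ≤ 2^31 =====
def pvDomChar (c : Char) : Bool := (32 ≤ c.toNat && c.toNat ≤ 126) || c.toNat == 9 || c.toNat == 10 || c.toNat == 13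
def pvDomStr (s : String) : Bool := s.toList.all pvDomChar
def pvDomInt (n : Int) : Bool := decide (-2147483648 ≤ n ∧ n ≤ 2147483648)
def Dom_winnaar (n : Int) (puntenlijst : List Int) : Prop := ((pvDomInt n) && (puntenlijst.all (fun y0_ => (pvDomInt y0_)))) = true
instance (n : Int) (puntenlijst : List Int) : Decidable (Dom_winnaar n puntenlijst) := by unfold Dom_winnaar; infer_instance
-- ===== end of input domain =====

-- B replaces A's modulo scatter into a scores array plus a second argmax scan by a
-- single loop that gathers each player's points with a strided index range and tracks
-- the running best (same last-wins tie rule); alternative decomposition, same cost.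


-- ===== PORT A =====
-- scores = [0]*n; for i in range(len(puntenlijst)): scores[i % n] += puntenlijst[i]
-- then max_i scan over range(1, n) with >=, return max_i + 1.
-- pyGetD/pySetD are the total forms of xs[i]; inside Pre_ every index is in range.
def winnaar (n : Int) (puntenlijst : List Int) : Int :=
  -- scores is Python's array-backed list; Array.getD/setIfInBounds are exact for the
  -- nonnegative in-range indices i % n reachable under Pre_ (0 < n).
  let scores0 : Array Int := Array.replicate n.toNat 0
  let scores := (PySem.List.pyRange 0 (PySem.List.len puntenlijst) 1).foldl
    (fun sc i =>
      let m := PySem.Int.mod i n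
      sc.setIfInBounds m.toNat (sc.getD m.toNat 0 + PySem.List.pyGetD puntenlijst i 0))
    scores0
  let maxI := (PySem.List.pyRange 1 n 1).foldl
    (fun mi i => if scores.getD i.toNat 0 ≥ scores.getD mi.toNat 0 then i else mi) 0
  maxI + 1

-- ===== PORT B =====
-- for j in range(n): s = sum(puntenlijst[i] for i in range(j, len(puntenlijst), n));
-- keep (best, best_score) with best_score = None before the first player.
def winnaar_alt (n : Int) (puntenlijst : List Int) : Int :=
  ((PySem.List.pyRange 0 n 1).foldl
    (fun (st : Int × Option Int) j =>
      let s := ((PySem.List.pyRange j (PySem.List.len puntenlijst) n).map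
                 (fun i => PySem.List.pyGetD puntenlijst i 0)).sum
      match st.2 with
      | none => (j + 1, some s)
      | some b => if s ≥ b then (j + 1, some s) else st)
    (1, none)).1

-- ===== PRECONDITION & SPEC =====
-- Pre_ excludes exactly the inputs where A raises: n ≤ 0 with a non-empty list
-- (ZeroDivisionError from i % 0, or IndexError on the empty scores list for n < 0).
def Pre_winnaar (n : Int) (puntenlijst : List Int) : Prop := 0 < n ∨ puntenlijst = []
instance (n : Int) (puntenlijst : List Int) : Decidable (Pre_winnaar n puntenlijst) := by unfold Pre_winnaar; infer_instance
def pvWitness_winnaar : Int × List Int := (3, [5, 1, 4, 2, 6, 3])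

def Spec_winnaar (n : Int) (puntenlijst : List Int) (out : Int) : Prop := out = winnaar_alt n puntenlijst
instance (n : Int) (puntenlijst : List Int) (out : Int) : Decidable (Spec_winnaar n puntenlijst out) := by unfold Spec_winnaar; infer_instance

-- ===== CLAIM (what is proved, stated in full; the proofs are below) =====
def Claim_equal_winnaar : Prop := ∀ (n : Int) (puntenlijst : List Int), Dom_winnaar n puntenlijst → Pre_winnaar n puntenlijst → Spec_winnaar n puntenlijst (winnaar n puntenlijst)

-- ===== LEMMAS AND PROOFS =====

-- range(j, b, n) grows on the right exactly when the new index b is player j's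
theorem pyRange_step_succ_right (n j L : Int) (hn : 0 < n) (hj : 0 ≤ j) (hjn : j < n) (hL : 0 ≤ L) :
    PySem.List.pyRange j (L+1) n = PySem.List.pyRange j L n ++ (if PySem.Int.mod L n = j then [L] else []) := by
  rw [PySem.List.pyRange_of_pos _ _ hn, PySem.List.pyRange_of_pos _ _ hn,
      PySem.Int.mod_eq_emod_of_pos hn]
  by_cases hjL : j ≤ L
  · rw [if_pos (by omega : j < L + 1)]
    have hq0 : 0 ≤ (L - j) / n := Int.ediv_nonneg (by omega) (by omega)
    have hdec := Int.emod_add_ediv (L - j) n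
    set q : Int := (L - j) / n with hq
    set r : Int := (L - j) % n with hr
    have hr0 : 0 ≤ r := Int.emod_nonneg _ (by omega)
    have hrn : r < n := Int.emod_lt_of_pos _ hn
    have hLr : L % n = (j + r) % n := by
      conv_lhs => rw [show L = (j + r) + n * q by omega]
      rw [Int.add_mul_emod_self_left]
    have hmod : L % n = j ↔ r = 0 := by
      rw [hLr]
      by_cases hlt : j + r < n
      · rw [Int.emod_eq_of_lt (by omega) hlt]; omega
      · rw [show j + r = (j + r - n) + n * 1 by ring, Int.add_mul_emod_self_left,
            Int.emod_eq_of_lt (by omega) (by omega)]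
        omega
    have hnq : n * (q + 1) = n * q + n := by ring
    have hnq0 : 0 ≤ n * q := by positivity
    have hc1 : (L + 1 - j + n - 1) / n = q + 1 := by
      rw [show L + 1 - j + n - 1 = r + n * (q + 1) by linear_combination -hdec, Int.add_mul_ediv_left _ _ (by omega),
          Int.ediv_eq_zero_of_lt hr0 hrn]
      ring
    by_cases hrz : r = 0
    · have hc0 : (if j < L then ((L - j + n - 1) / n).toNat else 0) = q.toNat := by
        by_cases hjL' : j < L
        · rw [if_pos hjL', show L - j + n - 1 = (n - 1) + n * q by omega,
              Int.add_mul_ediv_left _ _ (by omega), Int.ediv_eq_zero_of_lt (by omega) (by omega)]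
          simp
        · have hLj : L = j := by omega
          have : q = 0 := by rw [hq, hLj]; simp
          simp [hjL', this]
      rw [if_pos (hmod.mpr hrz), hc1, hc0, show (q+1).toNat = q.toNat + 1 by omega,
          List.range_succ, List.map_append]
      have hcast : (↑q.toNat : Int) = q := by omega
      simp [hcast]
      omega
    · have hc0 : (if j < L then ((L - j + n - 1) / n).toNat else 0) = (q + 1).toNat := by
        have hjL' : j < L := by omega
        rw [if_pos hjL', show L - j + n - 1 = (r - 1) + n * (q + 1) by linear_combination -hdec,
            Int.add_mul_ediv_left _ _ (by omega), Int.ediv_eq_zero_of_lt (by omega) (by omega)]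
        simp
      rw [if_neg (by omega : ¬ L % n = j), hc1, hc0]
      have : (q+1).toNat = q.toNat + 1 := by omega
      simp [this]
  · have hLn : L % n = L := Int.emod_eq_of_lt hL (by omega)
    rw [if_neg (by omega : ¬ j < L + 1), if_neg (by omega : ¬ j < L), if_neg (by omega : ¬ L % n = j)]
    simp

-- B's per-player strided sum
def strideSum (n : Int) (p : List Int) (j : Int) : Int :=
  ((PySem.List.pyRange j (PySem.List.len p) n).map (fun i => PySem.List.pyGetD p i 0)).sum

theorem strideSum_nil (n j : Int) (hn : 0 < n) (hj : 0 ≤ j) : strideSum n [] j = 0 := by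
  unfold strideSum
  rw [PySem.List.len_eq]
  simp only [List.length_nil, Nat.cast_zero]
  rw [PySem.List.pyRange_of_pos _ _ hn, if_neg (by omega : ¬ j < (0:Int))]
  simp

theorem strideSum_append (n : Int) (p : List Int) (x : Int) (j : Int)
    (hn : 0 < n) (hj : 0 ≤ j) (hjn : j < n) :
    strideSum n (p ++ [x]) j
      = strideSum n p j + (if PySem.Int.mod (p.length : Int) n = j then x else 0) := by
  unfold strideSum
  rw [PySem.List.len_eq, PySem.List.len_eq]
  rw [show ((p ++ [x]).length : Int) = (p.length : Int) + 1 by simp,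
      pyRange_step_succ_right n j (p.length : Int) hn hj hjn (by positivity),
      List.map_append, List.sum_append]
  congr 1
  · apply congrArg
    apply List.map_congr_left
    intro i hi
    rw [PySem.List.mem_pyRange_iff_of_pos hn] at hi
    have h0 : 0 ≤ i := by omega
    have h1 : i < ((p ++ [x]).length : Int) := by simp; omega
    rw [PySem.List.pyGetD_eq_getElem _ _ h0 h1, PySem.List.pyGetD_eq_getElem _ _ h0 (by omega)]
    exact List.getElem_append_left _
  · by_cases h : PySem.Int.mod (p.length : Int) n = j
    · rw [if_pos h, if_pos h]
      have : PySem.List.pyGetD (p ++ [x]) (p.length : Int) 0 = x := by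
        rw [PySem.List.pyGetD_natCast]
        simp [List.getD]
      simp [this]
    · rw [if_neg h, if_neg h]; simp

-- A's accumulation loop body (over fixed source list q)
def abody (n : Int) (q : List Int) : List Int → Int → List Int :=
  fun sc i =>
    let m := PySem.Int.mod i n
    PySem.List.pySetD sc m (PySem.List.pyGetD sc m 0 + PySem.List.pyGetD q i 0)

theorem scores_spec (n : Int) (hn : 0 < n) (p : List Int) :
    ((PySem.List.pyRange 0 (PySem.List.len p) 1).foldl (abody n p) (List.replicate n.toNat 0)).length = n.toNat
    ∧ ∀ j : Int, 0 ≤ j → j < n →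
      PySem.List.pyGetD ((PySem.List.pyRange 0 (PySem.List.len p) 1).foldl (abody n p) (List.replicate n.toNat 0)) j 0
        = strideSum n p j := by
  induction p using List.reverseRecOn with
  | nil =>
    constructor
    · simp [PySem.List.len_eq, PySem.List.pyRange_one_eq_nil (by omega : (0:Int) ≤ 0)]
    · intro j hj hjn
      rw [PySem.List.len_eq]
      simp only [List.length_nil, Nat.cast_zero, PySem.List.pyRange_one_eq_nil (by omega : (0:Int) ≤ 0), List.foldl_nil]
      rw [strideSum_nil n j hn hj, PySem.List.pyGetD_eq_getElem _ _ hj (by simp; omega)]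
      simp
  | append_singleton p x ih =>
    obtain ⟨ihlen, ihget⟩ := ih
    have hL0 : (0:Int) ≤ (p.length : Int) := by positivity
    have hsplit : PySem.List.pyRange 0 (PySem.List.len (p ++ [x])) 1
        = PySem.List.pyRange 0 (PySem.List.len p) 1 ++ [(p.length : Int)] := by
      rw [PySem.List.len_eq, PySem.List.len_eq, show ((p ++ [x]).length : Int) = (p.length : Int) + 1 by simp]
      exact PySem.List.pyRange_one_succ_right hL0
    have hcong : ∀ init : List Int,
        (PySem.List.pyRange 0 (PySem.List.len p) 1).foldl (abody n (p ++ [x])) init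
          = (PySem.List.pyRange 0 (PySem.List.len p) 1).foldl (abody n p) init := by
      intro init
      apply PySem.List.foldl_congr_mem
      intro acc i hi
      rw [PySem.List.len_eq, PySem.List.mem_pyRange_iff_of_pos (by omega : (0:Int) < 1)] at hi
      unfold abody
      have h0 : 0 ≤ i := hi.1
      have h1 : i < ((p ++ [x]).length : Int) := by simp; omega
      rw [PySem.List.pyGetD_eq_getElem (p ++ [x]) _ h0 h1, PySem.List.pyGetD_eq_getElem p _ h0 (by omega),
          List.getElem_append_left _]
    have hx : PySem.List.pyGetD (p ++ [x]) (p.length : Int) 0 = x := by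
      rw [PySem.List.pyGetD_natCast]; simp [List.getD]
    set S := (PySem.List.pyRange 0 (PySem.List.len p) 1).foldl (abody n p) (List.replicate n.toNat 0) with hS
    have hfold : (PySem.List.pyRange 0 (PySem.List.len (p ++ [x])) 1).foldl (abody n (p ++ [x])) (List.replicate n.toNat 0)
        = abody n (p ++ [x]) S (p.length : Int) := by
      rw [hsplit, List.foldl_append, hcong]
      rfl
    set m : Int := PySem.Int.mod (p.length : Int) n with hm
    have hm0 : 0 ≤ m := PySem.Int.mod_nonneg _ hn
    have hmn : m < n := PySem.Int.mod_lt _ hn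
    have habody : abody n (p ++ [x]) S (p.length : Int)
        = S.set m.toNat (PySem.List.pyGetD S m 0 + x) := by
      unfold abody
      rw [← hm, hx, PySem.List.pySetD_of_nonneg _ _ hm0]
    rw [hfold, habody]
    constructor
    · simp [ihlen]
    · intro j hj hjn
      have hjlen : j < ((S.set m.toNat (PySem.List.pyGetD S m 0 + x)).length : Int) := by
        simp [ihlen]; omega
      rw [PySem.List.pyGetD_eq_getElem _ _ hj hjlen, List.getElem_set,
          strideSum_append n p x j hn hj hjn, ← hm]
      by_cases hmj : m = j
      · rw [if_pos (by omega : m.toNat = j.toNat), if_pos hmj, ← ihget j hj hjn,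
            PySem.List.pyGetD_eq_getElem _ _ hj (by rw [ihlen]; omega)]
        subst hmj
        rw [PySem.List.pyGetD_eq_getElem S 0 hj (by rw [ihlen]; omega)]
      · rw [if_neg (by omega : ¬ m.toNat = j.toNat), if_neg hmj, ← ihget j hj hjn,
            PySem.List.pyGetD_eq_getElem _ _ hj (by rw [ihlen]; omega)]
        ring

theorem arr_getD (a : Array Int) (i : Nat) (d : Int) : a.getD i d = a.toList.getD i d := by
  simp only [Array.getD, Array.getInternal_eq_getElem, List.getD, Array.getElem?_toList]
  split
  · next h => simp [Array.getElem?_eq_getElem h]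
  · next h => simp [Array.getElem?_eq_none (show a.size ≤ i by omega)]

-- A's accumulation over the Array mirrors abody on the underlying list (0 < n)
theorem afold_toList (n : Int) (q : List Int) (hn : 0 < n) (l : List Int) :
    ∀ sc : Array Int,
    (l.foldl (fun sc i =>
      let m := PySem.Int.mod i n
      sc.setIfInBounds m.toNat (sc.getD m.toNat 0 + PySem.List.pyGetD q i 0)) sc).toList
    = l.foldl (abody n q) sc.toList := by
  induction l with
  | nil => intro sc; rfl
  | cons i l ih =>
    intro sc
    simp only [List.foldl_cons]
    rw [ih]
    congr 1
    have hm0 : 0 ≤ PySem.Int.mod i n := PySem.Int.mod_nonneg _ hn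
    unfold abody
    rw [Array.toList_setIfInBounds, arr_getD, PySem.List.pySetD_of_nonneg _ _ hm0,
        PySem.List.pyGetD_of_nonneg _ _ hm0]

theorem scan_lockstep (n : Int) (f g : Int → Int) (l : List Int)
    (hmem : ∀ j ∈ l, 0 ≤ j ∧ j < n)
    (hg : ∀ j, 0 ≤ j → j < n → g j = f j) :
    ∀ mi : Int, 0 ≤ mi → mi < n →
    l.foldl (fun (st : Int × Option Int) j => match st.2 with
        | none => (j + 1, some (g j))
        | some b => if g j ≥ b then (j + 1, some (g j)) else st) (mi + 1, some (f mi))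
    = (l.foldl (fun mi i => if f i ≥ f mi then i else mi) mi + 1,
       some (f (l.foldl (fun mi i => if f i ≥ f mi then i else mi) mi))) := by
  induction l with
  | nil => intro mi _ _; rfl
  | cons j l ih =>
    intro mi hmi0 hmin
    obtain ⟨hj0, hjn⟩ := hmem j (List.mem_cons_self)
    have hmem' : ∀ j ∈ l, 0 ≤ j ∧ j < n := fun a ha => hmem a (List.mem_cons_of_mem _ ha)
    simp only [List.foldl_cons]
    rw [hg j hj0 hjn]
    by_cases hc : f j ≥ f mi
    · rw [if_pos hc, if_pos hc]
      exact ih hmem' j hj0 hjn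
    · rw [if_neg hc, if_neg hc]
      exact ih hmem' mi hmi0 hmin

theorem winnaar_eq_pos (n : Int) (p : List Int) (hn : 0 < n) : winnaar n p = winnaar_alt n p := by
  obtain ⟨hlen, hget⟩ := scores_spec n hn p
  set S := (PySem.List.pyRange 0 (PySem.List.len p) 1).foldl (abody n p) (List.replicate n.toNat 0) with hS
  set A := (PySem.List.pyRange 0 (PySem.List.len p) 1).foldl
    (fun sc i =>
      let m := PySem.Int.mod i n
      sc.setIfInBounds m.toNat (sc.getD m.toNat 0 + PySem.List.pyGetD p i 0))
    (Array.replicate n.toNat 0) with hA2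
  have hAL : A.toList = S := by
    rw [hA2, afold_toList n p hn, Array.toList_replicate]
  have hfS : ∀ j : Int, 0 ≤ j → j < n → A.getD j.toNat 0 = strideSum n p j := by
    intro j h0 h1
    rw [arr_getD, hAL, ← PySem.List.pyGetD_of_nonneg _ _ h0]
    exact hget j h0 h1
  have hA : winnaar n p = (PySem.List.pyRange 1 n 1).foldl
      (fun mi i => if A.getD i.toNat 0 ≥ A.getD mi.toNat 0 then i else mi) 0 + 1 := rfl
  have hB : winnaar_alt n p = ((PySem.List.pyRange 0 n 1).foldl
      (fun (st : Int × Option Int) j => match st.2 with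
        | none => (j + 1, some (strideSum n p j))
        | some b => if strideSum n p j ≥ b then (j + 1, some (strideSum n p j)) else st) (1, none)).1 := rfl
  rw [hA, hB, PySem.List.pyRange_one_cons hn]
  simp only [List.foldl_cons, zero_add]
  have hmem : ∀ j ∈ PySem.List.pyRange 1 n 1, 0 ≤ j ∧ j < n := by
    intro j hj
    rw [PySem.List.mem_pyRange_one] at hj
    omega
  have := scan_lockstep n (fun j => A.getD j.toNat 0) (fun j => strideSum n p j)
      (PySem.List.pyRange 1 n 1) hmem (fun j h0 h1 => (hfS j h0 h1).symm) 0 le_rfl hn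
  rw [← hfS 0 le_rfl hn]
  beta_reduce at this
  simp only [zero_add, Int.toNat_zero] at this ⊢
  rw [this]

theorem winnaar_eq_neg (n : Int) (hn : n ≤ 0) : winnaar n [] = winnaar_alt n [] := by
  unfold winnaar winnaar_alt
  rw [PySem.List.len_eq]
  simp only [List.length_nil, Nat.cast_zero,
    PySem.List.pyRange_one_eq_nil (le_refl (0:Int)),
    PySem.List.pyRange_one_eq_nil (show n ≤ 1 by omega),
    PySem.List.pyRange_one_eq_nil hn, List.foldl_nil]
  norm_num

-- ===== VERDICT (by name: the statement is the Claim_ definition above) =====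
theorem winnaar_spec : Claim_equal_winnaar := by
  intro n p _ hpre
  unfold Spec_winnaar
  by_cases hn : 0 < n
  · exact winnaar_eq_pos n p hn
  · rcases hpre with h1 | h1
    · exact absurd h1 hn
    · subst h1
      exact winnaar_eq_neg n (by omega)
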